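-- pv_equiv track=rewrite | github.com/mikeakohn/mandelbrot_sse | msp430/software.py | mul32
-- ===== SOURCE A (Python) =====
-- def mul32(a, b):
--   total = 0
--   count = 0
--
--   if (a & 0x8000) != 0: a |= 0xffff0000
--   if (b & 0x8000) != 0: b |= 0xffff0000
--
--   while b != 0 and count < 32:
--     if (b & 1) != 0: total += a
--
--     a = a << 1
--     b = b >> 1
--
--     count += 1
--
--   return (total >> 12) & 0xffff
-- ===== SOURCE B (Python) =====
-- def mul32(a, b):
--   # Closed form: the shift-and-add loop multiplies a by the low 32 bits of b.
--   if (a & 0x8000) != 0: a |= 0xffff0000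
--   if (b & 0x8000) != 0: b |= 0xffff0000
--   return ((a * (b % 0x100000000)) >> 12) & 0xffff
-- ===== Notes on version B (the rewrite author's own statement) =====
-- stated objective: simpler
-- what changed: Replaces the 32-iteration shift-and-add multiplication loop with a single closed-form product of a and the low 32 bits of b (b % 2**32), keeping the sign-extension guards and the final shift/mask.
import Mathlib
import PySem

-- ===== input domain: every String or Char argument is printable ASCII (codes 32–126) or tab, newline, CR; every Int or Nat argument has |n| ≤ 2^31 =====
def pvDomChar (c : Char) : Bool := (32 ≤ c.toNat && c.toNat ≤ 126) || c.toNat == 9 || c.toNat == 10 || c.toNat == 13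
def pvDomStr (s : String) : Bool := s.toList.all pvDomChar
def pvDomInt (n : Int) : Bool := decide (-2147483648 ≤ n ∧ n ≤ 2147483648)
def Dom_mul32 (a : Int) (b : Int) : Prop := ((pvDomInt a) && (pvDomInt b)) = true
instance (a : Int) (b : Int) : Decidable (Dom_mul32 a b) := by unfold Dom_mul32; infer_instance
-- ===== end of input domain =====

-- B replaces A's 32-step shift-and-add loop by the closed-form product a * (b % 2^32); simpler, same value on all ints.

-- ===== PORT A =====
-- the while loop: fuel counts the remaining iterations (count < 32 ⟺ fuel > 0)
def mul32Loop : Nat → Int → Int → Int → Int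
  | 0, total, _, _ => total
  | fuel + 1, total, a, b =>
    if b ≠ 0 then
      mul32Loop fuel (if PySem.Int.band b 1 ≠ 0 then total + a else total)
        (a <<< (1 : Nat)) (b >>> (1 : Nat))
    else total

def mul32 (a : Int) (b : Int) : Int :=
  let a' := if PySem.Int.band a 0x8000 ≠ 0 then PySem.Int.bor a 0xffff0000 else a
  let b' := if PySem.Int.band b 0x8000 ≠ 0 then PySem.Int.bor b 0xffff0000 else b
  PySem.Int.band (mul32Loop 32 0 a' b' >>> (12 : Nat)) 0xffff

-- ===== PORT B =====
def mul32_alt (a : Int) (b : Int) : Int :=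
  let a' := if PySem.Int.band a 0x8000 ≠ 0 then PySem.Int.bor a 0xffff0000 else a
  let b' := if PySem.Int.band b 0x8000 ≠ 0 then PySem.Int.bor b 0xffff0000 else b
  PySem.Int.band ((a' * PySem.Int.mod b' 0x100000000) >>> (12 : Nat)) 0xffff

-- ===== PRECONDITION & SPEC =====
def Spec_mul32 (a : Int) (b : Int) (out : Int) : Prop := out = mul32_alt a b
instance (a : Int) (b : Int) (out : Int) : Decidable (Spec_mul32 a b out) := by unfold Spec_mul32; infer_instance

-- ===== CLAIM (what is proved, stated in full; the proofs are below) =====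
def Claim_equal_mul32 : Prop := ∀ (a : Int) (b : Int), Dom_mul32 a b → Spec_mul32 a b (mul32 a b)

-- ===== LEMMAS AND PROOFS =====
theorem pv_sr1 (b : Int) : b >>> (1 : Nat) = b / 2 := by
  simpa using Int.shiftRight_eq_div_pow b 1

theorem pv_sl1 (a : Int) : a <<< (1 : Nat) = 2 * a := by
  have h := Int.shiftLeft_eq a 1
  simpa [mul_comm] using h

theorem pv_band1 (b : Int) : PySem.Int.band b 1 = b % 2 := by
  rw [PySem.Int.band_one]; exact PySem.Int.mod_eq_emod_of_pos (by norm_num)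

theorem pv_emod_split (b m : Int) (hm : 0 < m) :
    b % (2 * m) = b % 2 + 2 * (b / 2 % m) := by
  set q : Int := b / 2 with hq
  have h2 : 2 * q + b % 2 = b := by
    have := Int.mul_ediv_add_emod b 2; omega
  have hqm : m * (q / m) + q % m = q := Int.mul_ediv_add_emod q m
  have hrw : b = (b % 2 + 2 * (q % m)) + (2 * m) * (q / m) := by
    calc b = 2 * q + b % 2 := h2.symm
    _ = 2 * (m * (q / m) + q % m) + b % 2 := by rw [hqm]
    _ = (b % 2 + 2 * (q % m)) + (2 * m) * (q / m) := by ring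
  have hlt : b % 2 + 2 * (q % m) < 2 * m := by
    have h1 : b % 2 < 2 := Int.emod_lt_of_pos b (by norm_num)
    have h3 : q % m < m := Int.emod_lt_of_pos q hm
    linarith
  have hge : 0 ≤ b % 2 + 2 * (q % m) := by
    have h1 : 0 ≤ b % 2 := Int.emod_nonneg b (by norm_num)
    have h3 : 0 ≤ q % m := Int.emod_nonneg q (by omega)
    linarith
  calc b % (2 * m) = ((b % 2 + 2 * (q % m)) + (2 * m) * (q / m)) % (2 * m) := by
        rw [← hrw]
    _ = (b % 2 + 2 * (q % m)) % (2 * m) := by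
        rw [Int.add_mul_emod_self_left]
    _ = b % 2 + 2 * (q % m) := Int.emod_eq_of_lt hge hlt

theorem mul32Loop_eq (fuel : Nat) :
    ∀ (total a b : Int), mul32Loop fuel total a b = total + a * (b % 2 ^ fuel) := by
  induction fuel with
  | zero => intro total a b; simp [mul32Loop]
  | succ n ih =>
    intro total a b
    by_cases hb : b = 0
    · simp [mul32Loop, hb]
    · have hsplit : b % 2 ^ (n + 1) = b % 2 + 2 * (b / 2 % 2 ^ n) := by
        have := pv_emod_split b (2 ^ n) (by positivity)
        rw [pow_succ, mul_comm (2 ^ n : Int) 2]; exact this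
      simp only [mul32Loop, hb, ne_eq, not_false_iff, if_pos]
      rw [ih, pv_sl1, pv_sr1, pv_band1, hsplit]
      rcases Int.emod_two_eq b with h | h <;> simp [h] <;> ring

theorem mul32_eq_alt (a b : Int) : mul32 a b = mul32_alt a b := by
  unfold mul32 mul32_alt
  simp only []
  set a' := if PySem.Int.band a 0x8000 ≠ 0 then PySem.Int.bor a 0xffff0000 else a with ha'
  set b' := if PySem.Int.band b 0x8000 ≠ 0 then PySem.Int.bor b 0xffff0000 else b with hb'
  congr 1
  rw [mul32Loop_eq 32 0 a' b']
  rw [PySem.Int.mod_eq_emod_of_pos (show (0:Int) < 0x100000000 by norm_num)]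
  norm_num

-- ===== VERDICT (by name: the statement is the Claim_ definition above) =====
theorem mul32_spec : Claim_equal_mul32 := by
  intro a b _
  unfold Spec_mul32
  exact mul32_eq_alt a b
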